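-- pv_equiv track=rewrite | github.com/spirinvadim/MixDAIseg | src/leo_daiseg/simulations/utils.py | get_HMM_tracts
-- ===== SOURCE A (Python) =====
-- def get_HMM_tracts(seq):
--     migrating_tracts = []
--     maxi = 0
--     for e in seq:
--         if e>maxi:
--             maxi=e
--
--     for i in range(maxi+1):
--         migrating_tracts.append([])
--     start=0
--     for i in range(1,len(seq)):
--         if seq[i]!=seq[i-1]:
--             migrating_tracts[seq[i-1]].append([start,i-1])
--             start=i
--     migrating_tracts[seq[len(seq)-1]].append([start,len(seq)-1])
--     return migrating_tracts
-- ===== SOURCE B (Python) =====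
-- def get_HMM_tracts(seq):
--     maxi = 0
--     for e in seq:
--         if e > maxi:
--             maxi = e
--     # phase 1: extract maximal constant runs as (value, start, end) with a two-pointer scan
--     runs = []
--     i = 0
--     while i < len(seq):
--         j = i
--         while j + 1 < len(seq) and seq[j + 1] == seq[j]:
--             j += 1
--         runs.append((seq[i], i, j))
--         i = j + 1
--     # phase 2: distribute the runs into per-value buckets
--     migrating_tracts = [[] for _ in range(maxi + 1)]
--     for v, s, e in runs:
--         migrating_tracts[v].append([s, e])
--     return migrating_tracts
-- ===== Notes on version B (the rewrite author's own statement) =====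
-- stated objective: alternative
-- what changed: A's single inline detect-and-emit scan carrying (buckets, start) state is replaced by a two-phase decomposition: a two-pointer extraction of the maximal constant runs as (value, start, end) triples, followed by distributing those runs into pre-allocated buckets.
import Mathlib
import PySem

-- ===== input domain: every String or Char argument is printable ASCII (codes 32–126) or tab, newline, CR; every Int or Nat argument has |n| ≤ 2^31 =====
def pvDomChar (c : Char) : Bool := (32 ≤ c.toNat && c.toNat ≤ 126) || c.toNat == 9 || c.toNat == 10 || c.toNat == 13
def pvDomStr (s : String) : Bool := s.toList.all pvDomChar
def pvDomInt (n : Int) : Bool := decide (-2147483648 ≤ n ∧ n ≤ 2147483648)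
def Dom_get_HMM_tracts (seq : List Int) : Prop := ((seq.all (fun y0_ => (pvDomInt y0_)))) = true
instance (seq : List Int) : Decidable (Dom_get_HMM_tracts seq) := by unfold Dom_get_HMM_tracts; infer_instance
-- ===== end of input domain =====

-- B replaces A's inline detect-and-emit scan (carrying buckets+start through one loop) by a
-- two-phase decomposition: two-pointer extraction of maximal constant runs, then distribution
-- of the runs into pre-allocated buckets (objective: alternative; same cost).

-- shared transliteration of the Python statement 'lst[v].append(x)' (list item assignment)
def pvAppendAt (bs : List (List (List Int))) (v : Int) (x : List Int) : List (List (List Int)) :=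
  PySem.List.pySetD bs v (PySem.List.pyGetD bs v [] ++ [x])

-- ===== PORT A =====
def get_HMM_tracts (seq : List Int) : List (List (List Int)) :=
  let maxi := seq.foldl (fun m e => if e > m then e else m) 0
  let migrating_tracts : List (List (List Int)) :=
    (PySem.List.pyRange 0 (maxi + 1) 1).foldl (fun bs _ => bs ++ [[]]) []
  let p := (PySem.List.pyRange 1 (seq.length : Int) 1).foldl
    (fun (p : List (List (List Int)) × Int) i =>
      if PySem.List.pyGetD seq i 0 ≠ PySem.List.pyGetD seq (i - 1) 0 then
        (pvAppendAt p.1 (PySem.List.pyGetD seq (i - 1) 0) [p.2, i - 1], i)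
      else p)
    (migrating_tracts, 0)
  pvAppendAt p.1 (PySem.List.pyGetD seq ((seq.length : Int) - 1) 0) [p.2, (seq.length : Int) - 1]

-- ===== PORT B =====
-- inner while loop of Source B: end index of the maximal constant run starting at j
def pvRunEnd (seq : List Int) (j : Nat) : Nat :=
  if h : j + 1 < seq.length ∧ seq.getD (j + 1) 0 = seq.getD j 0 then pvRunEnd seq (j + 1) else j
termination_by seq.length - j
decreasing_by omega

theorem pvRunEnd_ge (seq : List Int) (j : Nat) : j ≤ pvRunEnd seq j := by
  rw [pvRunEnd]
  split
  · exact le_trans (by omega) (pvRunEnd_ge seq (j + 1))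
  · exact le_refl j
termination_by seq.length - j
decreasing_by omega

-- outer while loop of Source B: the list of runs (value, start, end) from index i on
def pvRuns (seq : List Int) (i : Nat) : List (Int × Nat × Nat) :=
  if h : i < seq.length then
    (seq.getD i 0, i, pvRunEnd seq i) :: pvRuns seq (pvRunEnd seq i + 1)
  else []
termination_by seq.length - i
decreasing_by have := pvRunEnd_ge seq i; omega

def get_HMM_tracts_alt (seq : List Int) : List (List (List Int)) :=
  let maxi := seq.foldl (fun m e => if e > m then e else m) 0
  (pvRuns seq 0).foldl
    (fun bs r => pvAppendAt bs r.1 [(r.2.1 : Int), (r.2.2 : Int)])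
    (List.replicate (maxi + 1).toNat [])

-- ===== PRECONDITION & SPEC =====
-- Exactly the inputs on which the Python A returns: on empty seq A raises IndexError (seq[-1]
-- on the empty list), and an element below -(maxi+1) raises IndexError at the bucket lookup
-- (elements in [-(maxi+1), maxi] index the bucket list legally, negatives by Python wraparound,
-- which both ports model identically and which stays inside the claim).
def Pre_get_HMM_tracts (seq : List Int) : Prop :=
  seq ≠ [] ∧ ∀ e ∈ seq, -(seq.foldl (fun m x => if x > m then x else m) 0 + 1) ≤ e
instance (seq : List Int) : Decidable (Pre_get_HMM_tracts seq) := by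
  unfold Pre_get_HMM_tracts; infer_instance

def pvWitness_get_HMM_tracts : List Int := [0, 0, 2, 2, 1]

def Spec_get_HMM_tracts (seq : List Int) (out : List (List (List Int))) : Prop :=
  out = get_HMM_tracts_alt seq
instance (seq : List Int) (out : List (List (List Int))) : Decidable (Spec_get_HMM_tracts seq out) := by
  unfold Spec_get_HMM_tracts; infer_instance

-- ===== CLAIM (what is proved, stated in full; the proofs are below) =====
def Claim_equal_get_HMM_tracts : Prop :=
  ∀ (seq : List Int), Dom_get_HMM_tracts seq → Pre_get_HMM_tracts seq →
    Spec_get_HMM_tracts seq (get_HMM_tracts seq)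

-- ===== LEMMAS AND PROOFS =====

theorem pvRunEnd_getD (seq : List Int) (j : Nat) :
    seq.getD (pvRunEnd seq j) 0 = seq.getD j 0 := by
  rw [pvRunEnd]
  split
  · rename_i h
    rw [pvRunEnd_getD seq (j + 1), h.2]
  · rfl
termination_by seq.length - j
decreasing_by omega

theorem pvRunEnd_stop (seq : List Int) (j : Nat)
    (h : ¬ (j + 1 < seq.length ∧ seq.getD (j + 1) 0 = seq.getD j 0)) :
    pvRunEnd seq j = j := by
  rw [pvRunEnd, dif_neg h]

theorem pvRunEnd_step (seq : List Int) (j : Nat)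
    (h1 : j + 1 < seq.length) (h2 : seq.getD (j + 1) 0 = seq.getD j 0) :
    pvRunEnd seq j = pvRunEnd seq (j + 1) := by
  rw [pvRunEnd, dif_pos ⟨h1, h2⟩]

-- A's bucket-building loop produces a replicate
theorem pvBuckets_eq (l : List Int) (acc : List (List (List Int))) :
    l.foldl (fun bs _ => bs ++ [[]]) acc = acc ++ List.replicate l.length [] := by
  induction l generalizing acc with
  | nil => simp
  | cons x xs ih => simp [List.foldl, ih, List.replicate_succ]

-- the loop body of port B, named for the statements below
def pvDist (bs : List (List (List Int))) (r : Int × Nat × Nat) : List (List (List Int)) :=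
  pvAppendAt bs r.1 [(r.2.1 : Int), (r.2.2 : Int)]

-- A's scanning loop from index i (proof-only name for the fold inside port A)
def pvScan (seq : List Int) (i : Int) (st : List (List (List Int)) × Int) :
    List (List (List Int)) × Int :=
  (PySem.List.pyRange i (seq.length : Int) 1).foldl
    (fun (p : List (List (List Int)) × Int) k =>
      if PySem.List.pyGetD seq k 0 ≠ PySem.List.pyGetD seq (k - 1) 0 then
        (pvAppendAt p.1 (PySem.List.pyGetD seq (k - 1) 0) [p.2, k - 1], k)
      else p) st

-- A's final append (proof-only name)
def pvFin (seq : List Int) (st : List (List (List Int)) × Int) : List (List (List Int)) :=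
  pvAppendAt st.1 (PySem.List.pyGetD seq ((seq.length : Int) - 1) 0)
    [st.2, (seq.length : Int) - 1]

theorem pvScan_nil (seq : List Int) (i : Int) (h : (seq.length : Int) ≤ i)
    (st : List (List (List Int)) × Int) : pvScan seq i st = st := by
  rw [pvScan, PySem.List.pyRange_one_eq_nil h, List.foldl_nil]

theorem pvScan_cons (seq : List Int) (i : Int) (h : i < (seq.length : Int))
    (st : List (List (List Int)) × Int) :
    pvScan seq i st = pvScan seq (i + 1)
      (if PySem.List.pyGetD seq i 0 ≠ PySem.List.pyGetD seq (i - 1) 0 then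
        (pvAppendAt st.1 (PySem.List.pyGetD seq (i - 1) 0) [st.2, i - 1], i)
      else st) := by
  rw [pvScan, PySem.List.pyRange_one_cons h, List.foldl_cons, pvScan]

-- Main invariant: A's remaining scan from index i (state (bs, start)) followed by the final
-- append equals distributing the pending run of `start` and all later runs.
theorem pvMain (seq : List Int) (d : Nat) :
    ∀ (i start : Nat), seq.length - i = d → 1 ≤ i → i ≤ seq.length → start ≤ i - 1 →
      pvRunEnd seq start = pvRunEnd seq (i - 1) →
      ∀ bs : List (List (List Int)),
      pvFin seq (pvScan seq (i : Int) (bs, (start : Int)))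
      = ((seq.getD start 0, start, pvRunEnd seq start) ::
          pvRuns seq (pvRunEnd seq start + 1)).foldl pvDist bs := by
  induction d with
  | zero =>
    intro i start hd hi hin hs hrun bs
    have hie : i = seq.length := by omega
    subst hie
    have hlen : 1 ≤ seq.length := hi
    have hstop : pvRunEnd seq (seq.length - 1) = seq.length - 1 :=
      pvRunEnd_stop _ _ (by intro hc; omega)
    have hre : pvRunEnd seq start = seq.length - 1 := hrun.trans hstop
    have hnil : pvRuns seq (seq.length - 1 + 1) = [] := by
      rw [pvRuns, dif_neg (by omega)]
    have hcast : ((seq.length : Int) - 1) = ((seq.length - 1 : Nat) : Int) := by omega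
    have hval : seq.getD (seq.length - 1) 0 = seq.getD start 0 := by
      rw [← hre, pvRunEnd_getD]
    rw [pvScan_nil seq _ (le_refl _), hre, hnil, List.foldl_cons, List.foldl_nil, pvFin, pvDist,
      hcast, PySem.List.pyGetD_natCast, hval]
  | succ d ih =>
    intro i start hd hi hin hs hrun bs
    have hilt : i < seq.length := by omega
    have e1 : i - 1 + 1 = i := by omega
    have hcast : ((i : Int) - 1) = ((i - 1 : Nat) : Int) := by omega
    rw [pvScan_cons seq (i : Int) (by exact_mod_cast hilt), hcast,
      PySem.List.pyGetD_natCast, PySem.List.pyGetD_natCast]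
    by_cases hne : seq.getD i 0 = seq.getD (i - 1) 0
    · -- same run continues: state unchanged
      rw [if_neg (by simpa using hne)]
      have hrun' : pvRunEnd seq start = pvRunEnd seq (i + 1 - 1) := by
        have := pvRunEnd_step seq (i - 1) (by omega) (by rw [e1]; exact hne)
        rw [e1] at this
        simpa using hrun.trans this
      have := ih (i + 1) start (by omega) (by omega) (by omega) (by omega) hrun' bs
      rw [Nat.cast_add, Nat.cast_one] at this
      exact this
    · -- run boundary at i: A emits the pending tract, B's run list splits the same way
      rw [if_pos (by simpa using hne)]
      have hstop : pvRunEnd seq (i - 1) = i - 1 :=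
        pvRunEnd_stop _ _ (by intro hc; rw [e1] at hc; exact hne hc.2)
      have hre : pvRunEnd seq start = i - 1 := hrun.trans hstop
      have hrun' : pvRunEnd seq i = pvRunEnd seq (i + 1 - 1) := by simp
      have hval : seq.getD (i - 1) 0 = seq.getD start 0 := by
        rw [← hre, pvRunEnd_getD]
      have hruns : pvRuns seq i = (seq.getD i 0, i, pvRunEnd seq i) ::
          pvRuns seq (pvRunEnd seq i + 1) := by
        rw [pvRuns, dif_pos hilt]
      dsimp only
      have := ih (i + 1) i (by omega) (by omega) (by omega) (by omega) hrun'
        (pvAppendAt bs (seq.getD (i - 1) 0) [(start : Int), ((i - 1 : Nat) : Int)])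
      rw [Nat.cast_add, Nat.cast_one] at this
      rw [this, hre, show i - 1 + 1 = i from e1, hruns, ← hruns, List.foldl_cons]
      rw [show pvDist bs (seq.getD start 0, start, i - 1)
          = pvAppendAt bs (seq.getD (i - 1) 0) [(start : Int), ((i - 1 : Nat) : Int)] by
        rw [pvDist, hval]]

-- ===== VERDICT (by name: the statement is the Claim_ definition above) =====
theorem get_HMM_tracts_spec : Claim_equal_get_HMM_tracts := by
  intro seq _ hpre
  unfold Spec_get_HMM_tracts
  have hlen : 1 ≤ seq.length :=
    Nat.one_le_iff_ne_zero.mpr (fun h => hpre.1 (List.length_eq_zero_iff.mp h))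
  have hbuckets := pvBuckets_eq (PySem.List.pyRange 0
    ((seq.foldl (fun m e => if e > m then e else m) 0) + 1) 1) []
  have hmain := pvMain seq (seq.length - 1) 1 0 (by omega) (by omega) (by omega) (by omega)
    (by simp)
    ((PySem.List.pyRange 0 ((seq.foldl (fun m e => if e > m then e else m) 0) + 1) 1).foldl
      (fun bs _ => bs ++ [[]]) [])
  have hruns0 : pvRuns seq 0 = (seq.getD 0 0, 0, pvRunEnd seq 0) ::
      pvRuns seq (pvRunEnd seq 0 + 1) := by
    rw [pvRuns, dif_pos (by omega)]
  rw [Nat.cast_one, Nat.cast_zero] at hmain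
  show pvFin seq (pvScan seq 1 (_, 0)) = _
  rw [hmain, ← hruns0, get_HMM_tracts_alt]
  rw [hbuckets]
  simp only [PySem.List.length_pyRange_one, List.nil_append, Int.sub_zero]
  rfl
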